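-- pv_equiv track=rewrite | github.com/HighBe/SolidityWorm | test/function.py | countEmitLine
-- ===== SOURCE A (Python) =====
-- def countEmitLine(str):
--     lines = str.split("\n")
--     i = 0
--     emitcount = 0
--     while i < len(lines):
--         lines[i] = lines[i].strip()
--         # 遇到emit则emit计数器与总计数器都加一，同时直接略过下面的判断语句
--         if lines[i].startswith("emit "):
--             emitcount += 1
--             i += 1
--             continue
--         # 遇到注释，如果行首是//那么直接跳过这行，如果行首是/*需要找到*/，在这期间的内容都不要
--         if lines[i].startswith("//"):
--             i += 1
--             continue
--         if lines[i].startswith("/*"):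
--             rightzhushi = lines[i].find("*/")
--             # 找到另一半注释
--             while rightzhushi == -1:
--                 i += 1
--                 if i >= len(lines):  # 防止有的人只写注释的前一半，不写后一半
--                     break
--                 rightzhushi = lines[i].find("*/")
--             i += 1
--             continue
--         i += 1
--     return emitcount
-- ===== SOURCE B (Python) =====
-- def countEmitLine(str):
--     in_comment = False
--     count = 0
--     for line in str.split("\n"):
--         if in_comment:
--             if "*/" in line:
--                 in_comment = False
--             continue
--         s = line.strip()
--         if s.startswith("emit "):
--             count += 1
--         elif s.startswith("//"):
--             pass
--         elif s.startswith("/*") and "*/" not in s: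
--             in_comment = True
--     return count
-- ===== Notes on version B (the rewrite author's own statement) =====
-- stated objective: simpler
-- what changed: Replaces the index-advancing nested while loops with a flat single for-pass carrying an in_comment boolean flag.
import Mathlib
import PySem

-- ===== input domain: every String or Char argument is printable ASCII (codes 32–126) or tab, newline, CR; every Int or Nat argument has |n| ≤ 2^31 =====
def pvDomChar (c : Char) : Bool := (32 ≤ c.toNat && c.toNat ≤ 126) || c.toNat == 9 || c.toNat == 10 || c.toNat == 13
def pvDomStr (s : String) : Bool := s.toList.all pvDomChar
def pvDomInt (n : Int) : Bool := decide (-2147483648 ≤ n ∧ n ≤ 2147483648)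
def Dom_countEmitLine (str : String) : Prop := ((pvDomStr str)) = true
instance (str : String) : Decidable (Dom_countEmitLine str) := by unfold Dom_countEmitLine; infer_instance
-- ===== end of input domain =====

-- B replaces A's nested index-advancing while loops by one flat pass with an in_comment flag (simpler).

-- ===== PORT A =====
-- A's outer 'while i < len(lines)' as recursion over the remaining lines (i only ever advances);
-- the inner '*/'-hunting while is pvSkipA.  Chars.* primitives are exact per PYSEM.
mutual
def pvLoopA : List (List Char) → Int → Int
  | [], acc => acc
  | l :: rest, acc =>
    let s := PySem.Chars.strip l          -- lines[i] = lines[i].strip()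
    if PySem.Chars.startswith s "emit ".toList then pvLoopA rest (acc + 1)
    else if PySem.Chars.startswith s "//".toList then pvLoopA rest acc
    else if PySem.Chars.startswith s "/*".toList then
      if PySem.Chars.find s "*/".toList = -1 then pvSkipA rest acc
      else pvLoopA rest acc
    else pvLoopA rest acc
def pvSkipA : List (List Char) → Int → Int
  | [], acc => acc
  | l :: rest, acc =>
    if PySem.Chars.find l "*/".toList = -1 then pvSkipA rest acc
    else pvLoopA rest acc
end

def countEmitLine (str : String) : Int :=
  pvLoopA (PySem.Chars.splitOn str.toList "\n".toList) 0

-- ===== PORT B =====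
-- one fold step per line, state = (in_comment, count)
def pvStepB (st : Bool × Int) (line : List Char) : Bool × Int :=
  if st.1 then
    (if PySem.Chars.isIn "*/".toList line then (false, st.2) else st)
  else
    let s := PySem.Chars.strip line
    if PySem.Chars.startswith s "emit ".toList then (false, st.2 + 1)
    else if PySem.Chars.startswith s "//".toList then st
    else if PySem.Chars.startswith s "/*".toList && !(PySem.Chars.isIn "*/".toList s) then (true, st.2)
    else st

def countEmitLine_alt (str : String) : Int :=
  ((PySem.Chars.splitOn str.toList "\n".toList).foldl pvStepB (false, 0)).2

-- ===== PRECONDITION & SPEC =====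
def Spec_countEmitLine (str : String) (out : Int) : Prop := out = countEmitLine_alt str
instance (str : String) (out : Int) : Decidable (Spec_countEmitLine str out) := by unfold Spec_countEmitLine; infer_instance

-- ===== CLAIM (what is proved, stated in full; the proofs are below) =====
def Claim_equal_countEmitLine : Prop := ∀ (str : String), Dom_countEmitLine str → Spec_countEmitLine str (countEmitLine str)

-- ===== LEMMAS AND PROOFS =====

-- in each mode A's loop state (position + count) matches B's fold state (flag + count)
theorem pv_loop_eq_fold (ls : List (List Char)) : ∀ acc : Int,
    pvLoopA ls acc = (ls.foldl pvStepB (false, acc)).2 ∧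
    pvSkipA ls acc = (ls.foldl pvStepB (true, acc)).2 := by
  induction ls with
  | nil => intro acc; simp [pvLoopA, pvSkipA]
  | cons l rest ih =>
    intro acc
    refine ⟨?_, ?_⟩
    · rw [pvLoopA, List.foldl_cons]
      by_cases h1 : PySem.Chars.startswith (PySem.Chars.strip l) ['e','m','i','t',' '] = true
      · simp only [pvStepB, h1, if_true, if_false]
        simp [h1, (ih (acc + 1)).1]
      · by_cases h2 : PySem.Chars.startswith (PySem.Chars.strip l) ['/','/'] = true
        · simp [pvStepB, h1, h2, (ih acc).1]
        · by_cases h3 : PySem.Chars.startswith (PySem.Chars.strip l) ['/','*'] = true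
          · by_cases h4 : PySem.Chars.find (PySem.Chars.strip l) ['*','/'] = -1
            · have hIn : PySem.Chars.isIn ['*','/'] (PySem.Chars.strip l) = false :=
                (PySem.Chars.isIn_eq_false_iff _ _).mpr
                  ((PySem.Chars.find_eq_neg_one_iff _ _).mp h4)
              simp [pvStepB, h1, h2, h3, h4, hIn, (ih acc).2]
            · have hIn : PySem.Chars.isIn ['*','/'] (PySem.Chars.strip l) = true :=
                (PySem.Chars.isIn_iff_infix _ _).mpr
                  ((PySem.Chars.find_ne_neg_one_iff _ _).mp h4)
              simp [pvStepB, h1, h2, h3, h4, hIn, (ih acc).1]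
          · simp [pvStepB, h1, h2, h3, (ih acc).1]
    · rw [pvSkipA, List.foldl_cons]
      by_cases h : PySem.Chars.find l ['*','/'] = -1
      · have hIn : PySem.Chars.isIn ['*','/'] l = false :=
          (PySem.Chars.isIn_eq_false_iff _ _).mpr ((PySem.Chars.find_eq_neg_one_iff _ _).mp h)
        simp [pvStepB, h, hIn, (ih acc).2]
      · have hIn : PySem.Chars.isIn ['*','/'] l = true :=
          (PySem.Chars.isIn_iff_infix _ _).mpr ((PySem.Chars.find_ne_neg_one_iff _ _).mp h)
        simp [pvStepB, h, hIn, (ih acc).1]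

-- ===== VERDICT (by name: the statement is the Claim_ definition above) =====
theorem countEmitLine_spec : Claim_equal_countEmitLine := by
  intro str _
  unfold Spec_countEmitLine countEmitLine countEmitLine_alt
  exact (pv_loop_eq_fold _ 0).1
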